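-- pv_equiv track=rewrite | github.com/bellecode20/algorithm-archive | su/2026-01/22_boj_문자열게임2.py | find_string
-- ===== SOURCE A (Python) =====
-- from collections import defaultdict
--
-- def find_string(K, W):
--     minval, maxval = len(W) + 1, -1
--     info = defaultdict(list)
--     for i in range(len(W)):
--         info[W[i]].append(i)
--
--     for idx_list in info.values():
--         if len(idx_list) < K:
--             continue
--         for i in range(len(idx_list) - K + 1):
--             minval = min(minval, idx_list[i + K - 1] - idx_list[i] + 1)
--             maxval = max(maxval, idx_list[i + K - 1] - idx_list[i] + 1)
--
--     return minval, maxval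
-- ===== SOURCE B (Python) =====
-- def find_string(K, W):
--     minval, maxval = len(W) + 1, -1
--     pairs = sorted(zip(W, range(len(W))))
--     for (c1, i1), (c2, i2) in zip(pairs, pairs[K - 1:]):
--         if c1 == c2:
--             span = i2 - i1 + 1
--             if span < minval:
--                 minval = span
--             if span > maxval:
--                 maxval = span
--     return minval, maxval
-- ===== Notes on version B (the rewrite author's own statement) =====
-- stated objective: alternative
-- what changed: B replaces A's hash-grouping (dict of per-character index lists, then a nested window scan per list) by sort-then-scan: it sorts the (char, index) pairs once, which puts each character's occurrences consecutively, and reads every K-occurrence span off one linear scan of the sorted array with a same-char guard.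
import Mathlib
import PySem

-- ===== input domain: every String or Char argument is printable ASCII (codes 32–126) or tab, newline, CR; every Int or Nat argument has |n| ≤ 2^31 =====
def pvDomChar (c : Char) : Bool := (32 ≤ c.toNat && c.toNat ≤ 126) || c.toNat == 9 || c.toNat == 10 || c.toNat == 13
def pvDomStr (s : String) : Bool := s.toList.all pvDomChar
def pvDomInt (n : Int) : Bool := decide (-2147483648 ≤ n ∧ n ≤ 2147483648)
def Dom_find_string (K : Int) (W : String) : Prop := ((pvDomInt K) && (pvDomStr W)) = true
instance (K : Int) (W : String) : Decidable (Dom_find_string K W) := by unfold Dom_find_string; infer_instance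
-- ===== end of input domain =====

-- B replaces A's dict-of-index-lists grouping and nested window scan by sort-then-scan:
-- sort the (char, index) pairs once, then read every K-occurrence span off one guarded
-- linear scan of the sorted array (objective: alternative algorithm, no dict at all).

-- ===== PORT A =====
-- 'for i in range(len(W)): … W[i] …' is iterated as enumerate(W), which yields the same (i, W[i]) pairs.
def find_string (K : Int) (W : String) : Int × Int :=
  let cs := W.toList
  let minval : Int := PySem.Str.len W + 1
  let maxval : Int := -1
  let info : PySem.Dict Char (List Int) :=
    (PySem.List.enumerate cs).foldl
      (fun d p => d.modify p.2 [] (· ++ [p.1])) PySem.Dict.empty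
  (info.values).foldl
    (fun (mm : Int × Int) idx_list =>
      if PySem.List.len idx_list < K then mm
      else
        (PySem.List.pyRange 0 (PySem.List.len idx_list - K + 1) 1).foldl
          (fun mm i =>
            let s := PySem.List.pyGetD idx_list (i + K - 1) 0
                       - PySem.List.pyGetD idx_list i 0 + 1
            (min mm.1 s, max mm.2 s)) mm)
    (minval, maxval)

-- ===== PORT B =====
-- pairs = sorted(zip(W, range(len(W)))): Python's tuple sort = sorted2 on (fst, snd).
def find_string_alt (K : Int) (W : String) : Int × Int :=
  let cs := W.toList
  let pairs := PySem.List.sorted2 (List.zip cs (PySem.List.pyRange 0 (PySem.Str.len W) 1))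
                 (fun p => p.1) (fun p => p.2) false
  (List.zip pairs (PySem.List.slice pairs (some (K - 1)) none)).foldl
    (fun (mm : Int × Int) q =>
      if q.1.1 == q.2.1 then
        let span := q.2.2 - q.1.2 + 1
        (if span < mm.1 then span else mm.1, if mm.2 < span then span else mm.2)
      else mm)
    (PySem.Str.len W + 1, -1)

-- ===== PRECONDITION & SPEC =====
-- Pre_ excludes exactly the inputs where A raises IndexError: K ≤ 0 with a nonempty W
-- (A's window loop then indexes past the end of every index list).
def Pre_find_string (K : Int) (W : String) : Prop := 1 ≤ K ∨ W = ""
instance (K : Int) (W : String) : Decidable (Pre_find_string K W) := by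
  unfold Pre_find_string; infer_instance

def pvWitness_find_string : Int × String := (2, "abab")

def Spec_find_string (K : Int) (W : String) (out : Int × Int) : Prop := out = find_string_alt K W
instance (K : Int) (W : String) (out : Int × Int) : Decidable (Spec_find_string K W out) := by
  unfold Spec_find_string; infer_instance

-- ===== CLAIM (what is proved, stated in full; the proofs are below) =====
def Claim_equal_find_string : Prop := ∀ (K : Int) (W : String), Dom_find_string K W → Pre_find_string K W → Spec_find_string K W (find_string K W)

-- ===== LEMMAS AND PROOFS =====

-- ---- shared vocabulary: per-character position lists and window spans ----
def pvP (l : List (Int × Char)) (c : Char) : List Int :=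
  (l.filter (fun p => p.2 == c)).map (·.1)

-- the spans of all K-windows of one index list, in A's inner-loop order
def pvW (K : Int) (L : List Int) : List Int :=
  (PySem.List.pyRange 0 (PySem.List.len L - K + 1) 1).map
    (fun i => PySem.List.pyGetD L (i + K - 1) 0 - PySem.List.pyGetD L i 0 + 1)

def pvStep (mm : Int × Int) (s : Int) : Int × Int := (min mm.1 s, max mm.2 s)

-- ---- A-side: grouping dict characterised ----
def pvBuildStep (d : PySem.Dict Char (List Int)) (p : Int × Char) : PySem.Dict Char (List Int) :=
  d.modify p.2 [] (· ++ [p.1])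

def pvBuild (l : List (Int × Char)) (d : PySem.Dict Char (List Int)) : PySem.Dict Char (List Int) :=
  l.foldl pvBuildStep d

-- all spans, grouped by character in first-occurrence order (A's outer-loop order)
def pvSpans (K : Int) (l : List (Int × Char)) : List Int :=
  ((PySem.List.dedup (l.map (·.2))).map (fun c => pvW K (pvP l c))).flatten

def pvStepA (K : Int) (mm : Int × Int) (idx_list : List Int) : Int × Int :=
  if PySem.List.len idx_list < K then mm
  else
    (PySem.List.pyRange 0 (PySem.List.len idx_list - K + 1) 1).foldl
      (fun mm i =>
        let s := PySem.List.pyGetD idx_list (i + K - 1) 0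
                   - PySem.List.pyGetD idx_list i 0 + 1
        (min mm.1 s, max mm.2 s)) mm

lemma find_string_eq (K : Int) (W : String) :
    find_string K W =
      ((pvBuild (PySem.List.enumerate W.toList) PySem.Dict.empty).values).foldl
        (pvStepA K) (PySem.Str.len W + 1, -1) := rfl

lemma pvBuild_getD (l : List (Int × Char)) (d : PySem.Dict Char (List Int)) (c : Char) :
    (pvBuild l d).getD c [] = d.getD c [] ++ pvP l c := by
  have h : pvBuild l d
      = (l.map Prod.swap).foldl (fun d p => d.modify p.1 [] (· ++ [p.2])) d := by
    rw [List.foldl_map]; rfl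
  rw [h, PySem.Dict.getD_foldl_modify_append]
  congr 1
  rw [List.filter_map, List.map_map, pvP]
  rfl

lemma pvBuild_keys (l : List (Int × Char)) :
    (pvBuild l PySem.Dict.empty).keys = PySem.List.dedup (l.map (·.2)) := by
  have h : pvBuild l PySem.Dict.empty
      = l.foldl (fun d x => d.modify ((·.2) x) []
          ((fun (_ : PySem.Dict Char (List Int)) (x : Int × Char) => (· ++ [x.1])) d x))
          PySem.Dict.empty := rfl
  rw [h, PySem.Dict.keys_foldl_modify_key, PySem.Dict.keys_empty,
    PySem.Set.update_nil_left, PySem.List.dedup_eq_ofList]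

lemma pvBuild_keys_nodup (l : List (Int × Char)) :
    (pvBuild l PySem.Dict.empty).keys.Nodup := by
  rw [pvBuild_keys]
  exact PySem.List.nodup_dedup _

lemma pvValues_eq_map_getD {κ ν : Type} [BEq κ] [LawfulBEq κ]
    (d : PySem.Dict κ ν) (h : d.keys.Nodup) (v0 : ν) :
    d.values = d.keys.map (fun k => d.getD k v0) := by
  have hv : d.values = d.items.map (·.2) := rfl
  have hk : d.keys = d.items.map (·.1) := rfl
  rw [hv, hk, List.map_map]
  refine List.map_congr_left ?_
  intro p hp
  have hmem : (p.1, p.2) ∈ d.items := by simpa using hp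
  exact (PySem.Dict.getD_of_mem_items d hmem h v0).symm

lemma pvBuild_values (l : List (Int × Char)) :
    (pvBuild l PySem.Dict.empty).values
      = (PySem.List.dedup (l.map (·.2))).map (fun c => pvP l c) := by
  rw [pvValues_eq_map_getD (pvBuild l PySem.Dict.empty) (pvBuild_keys_nodup l) [],
    pvBuild_keys]
  refine List.map_congr_left ?_
  intro c _
  rw [pvBuild_getD, PySem.Dict.getD_empty, List.nil_append]

lemma pvStepA_eq (K : Int) (mm : Int × Int) (L : List Int) :
    pvStepA K mm L = (pvW K L).foldl pvStep mm := by
  by_cases h : PySem.List.len L < K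
  · have hr : PySem.List.pyRange 0 (PySem.List.len L - K + 1) 1 = [] := by
      refine PySem.List.pyRange_one_eq_nil ?_
      have hlen : (0 : Int) ≤ PySem.List.len L := by
        simp only [PySem.List.len]; positivity
      omega
    unfold pvStepA
    rw [if_pos h, pvW, hr, List.map_nil, List.foldl_nil]
  · simp only [pvStepA, if_neg h, pvW, List.foldl_map]
    rfl

-- A = fold of pvStep over the grouped spans
lemma pvA_eq_fold (K : Int) (W : String) :
    find_string K W
      = (pvSpans K (PySem.List.enumerate W.toList)).foldl pvStep (PySem.Str.len W + 1, -1) := by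
  rw [find_string_eq, pvBuild_values, List.foldl_map, pvSpans, List.foldl_flatten, List.foldl_map]
  have hfun : (fun (mm : Int × Int) (c : Char) =>
      pvStepA K mm ((fun c => pvP (PySem.List.enumerate W.toList) c) c))
      = (fun (mm : Int × Int) (c : Char) =>
          (fun (b : Int × Int) (L : List Int) => L.foldl pvStep b) mm
            ((fun c => pvW K (pvP (PySem.List.enumerate W.toList) c)) c)) := by
    funext mm c
    exact pvStepA_eq K mm _
  rw [hfun]

-- ---- B-side: the sorted pair list characterised ----
def pvBefore (a b : Char × Int) : Bool :=
  decide (a.1 < b.1) || (!decide (b.1 < a.1) && decide (a.2 < b.2))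

def pvLt (a b : Char × Int) : Prop := a.1 < b.1 ∨ (a.1 = b.1 ∧ a.2 < b.2)

def pvR (a b : Char × Int) : Prop := ¬ pvLt b a

-- B's loop body on a zipped pair of (char, index) pairs
def pvStepZ (mm : Int × Int) (q : (Char × Int) × (Char × Int)) : Int × Int :=
  if q.1.1 == q.2.1 then
    let span := q.2.2 - q.1.2 + 1
    (if span < mm.1 then span else mm.1, if mm.2 < span then span else mm.2)
  else mm

def pvGrp (l : List (Int × Char)) (c : Char) : List (Char × Int) :=
  (pvP l c).map (fun i => (c, i))

def pvChars (l : List (Int × Char)) : List Char :=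
  PySem.List.sorted (PySem.List.dedup (l.map (·.2))) (fun c => c) false

def pvGp (l : List (Int × Char)) : List (Char × Int) :=
  ((pvChars l).map (pvGrp l)).flatten

lemma pvBefore_iff (a b : Char × Int) : pvBefore a b = true ↔ pvLt a b := by
  simp only [pvBefore, pvLt, Bool.or_eq_true, Bool.and_eq_true, Bool.not_eq_true',
    decide_eq_true_eq, decide_eq_false_iff_not]
  constructor
  · rintro (h | ⟨h1, h2⟩)
    · exact Or.inl h
    · rcases lt_or_ge a.1 b.1 with h3 | h3
      · exact Or.inl h3
      · exact Or.inr ⟨le_antisymm (le_of_not_gt h1) h3, h2⟩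
  · rintro (h | ⟨h1, h2⟩)
    · exact Or.inl h
    · exact Or.inr ⟨by rw [h1]; exact lt_irrefl _, h2⟩

lemma pvLt_asymm {a b : Char × Int} (h : pvLt a b) : ¬ pvLt b a := by
  rcases h with h | ⟨h1, h2⟩ <;> rintro (h' | ⟨h1', h2'⟩)
  · exact absurd h' (lt_asymm h)
  · rw [h1'] at h; exact lt_irrefl _ h
  · rw [h1] at h'; exact lt_irrefl _ h'
  · omega

lemma pvLt_trans {a b c : Char × Int} (h1 : pvLt a b) (h2 : pvLt b c) : pvLt a c := by
  rcases h1 with h1 | ⟨h1, h1'⟩ <;> rcases h2 with h2 | ⟨h2, h2'⟩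
  · exact Or.inl (lt_trans h1 h2)
  · exact Or.inl (h2 ▸ h1)
  · exact Or.inl (h1 ▸ h2)
  · exact Or.inr ⟨h1.trans h2, by omega⟩

lemma pvR_antisymm {a b : Char × Int} (h1 : pvR a b) (h2 : pvR b a) : a = b := by
  unfold pvR pvLt at h1 h2
  push_neg at h1 h2
  have hc : a.1 = b.1 := le_antisymm h1.1 h2.1
  have hi : a.2 = b.2 := by
    have := h1.2 hc.symm
    have := h2.2 hc
    omega
  exact Prod.ext hc hi

lemma pvInsertBy_perm {α : Type} (bf : α → α → Bool) (x : α) (ys : List α) :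
    (PySem.List.insertBy bf x ys).Perm (x :: ys) := by
  induction ys with
  | nil => simp [PySem.List.insertBy]
  | cons y ys ih =>
    by_cases h : bf x y
    · simp [PySem.List.insertBy, h]
    · simp only [PySem.List.insertBy, h, Bool.false_eq_true, if_false]
      exact ((ih.cons y).trans (List.Perm.swap x y ys))

lemma pvFoldlInsertBy_perm {α : Type} (bf : α → α → Bool) :
    ∀ (xs acc : List α), (xs.foldl (fun acc x => PySem.List.insertBy bf x acc) acc).Perm (xs ++ acc) := by
  intro xs
  induction xs with
  | nil => intro acc; simp
  | cons x xs ih =>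
    intro acc
    have h1 := ih (PySem.List.insertBy bf x acc)
    have h2 : (xs ++ PySem.List.insertBy bf x acc).Perm (xs ++ (x :: acc)) :=
      List.Perm.append_left xs (pvInsertBy_perm bf x acc)
    have h3 : (xs ++ (x :: acc)).Perm (x :: (xs ++ acc)) := List.perm_middle
    exact (h1.trans (h2.trans h3))

lemma pvInsertBy_pairwise (x : Char × Int) (ys : List (Char × Int))
    (h : ys.Pairwise pvR) : (PySem.List.insertBy pvBefore x ys).Pairwise pvR := by
  induction ys with
  | nil => simp [PySem.List.insertBy]
  | cons y ys ih =>
    rcases List.pairwise_cons.1 h with ⟨hy, hys⟩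
    by_cases hb : pvBefore x y
    · have hxy : pvLt x y := (pvBefore_iff x y).1 hb
      simp only [PySem.List.insertBy, hb, if_true]
      refine List.pairwise_cons.2 ⟨?_, h⟩
      intro z hz
      rcases List.mem_cons.1 hz with hz | hz
      · subst hz; exact pvLt_asymm hxy
      · intro hlt
        exact (hy z hz) (pvLt_trans hlt hxy)
    · simp only [PySem.List.insertBy, hb, Bool.false_eq_true, if_false]
      refine List.pairwise_cons.2 ⟨?_, ih hys⟩
      intro z hz
      rcases (PySem.List.mem_insertBy pvBefore x z ys).1 hz with hz | hz
      · intro hlt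
        exact hb ((pvBefore_iff x y).2 (hz ▸ hlt))
      · exact hy z hz

lemma pvSorted2_eq (xs ys : List (Char × Int)) (hperm : ys.Perm xs)
    (hpw : ys.Pairwise pvLt) :
    PySem.List.sorted2 xs (fun p => p.1) (fun p => p.2) false = ys := by
  have hunf : PySem.List.sorted2 xs (fun p => p.1) (fun p => p.2) false
      = xs.foldl (fun acc x => PySem.List.insertBy pvBefore x acc) [] := rfl
  rw [hunf]
  have hP : (xs.foldl (fun acc x => PySem.List.insertBy pvBefore x acc) []).Pairwise pvR := by
    have : ∀ (l : List (Char × Int)) (acc : List (Char × Int)), acc.Pairwise pvR →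
        (l.foldl (fun acc x => PySem.List.insertBy pvBefore x acc) acc).Pairwise pvR := by
      intro l
      induction l with
      | nil => intro acc h; exact h
      | cons x l ih => intro acc h; exact ih _ (pvInsertBy_pairwise x acc h)
    exact this xs [] List.Pairwise.nil
  have hperm' : (xs.foldl (fun acc x => PySem.List.insertBy pvBefore x acc) []).Perm ys := by
    have h1 : (xs.foldl (fun acc x => PySem.List.insertBy pvBefore x acc) []).Perm xs := by
      simpa using pvFoldlInsertBy_perm pvBefore xs []
    exact h1.trans hperm.symm
  have hysR : ys.Pairwise pvR := hpw.imp (fun h => pvLt_asymm h)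
  exact List.Perm.eq_of_pairwise (fun a b _ _ h1 h2 => pvR_antisymm h1 h2) hP hysR hperm'

-- each group is a fiber of the swapped pair list
lemma pvGrp_eq_filter (l : List (Int × Char)) (c : Char) :
    pvGrp l c = (l.map Prod.swap).filter (fun p => p.1 == c) := by
  rw [pvGrp, pvP, List.map_map, List.filter_map]
  have hp : ((fun (p : Char × Int) => p.1 == c) ∘ Prod.swap) = (fun (p : Int × Char) => p.2 == c) := by
    funext p; rfl
  rw [hp]
  refine List.map_congr_left ?_
  intro p hp
  have := List.of_mem_filter hp
  have hc : p.2 = c := by simpa using this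
  simp [Prod.swap, hc]

lemma pvFiber_perm : ∀ (ks : List Char) (ps : List (Char × Int)), ks.Nodup →
    (∀ p ∈ ps, p.1 ∈ ks) →
    ((ks.map (fun c => ps.filter (fun p => p.1 == c))).flatten).Perm ps := by
  intro ks
  induction ks with
  | nil =>
    intro ps _ hcov
    have : ps = [] := by
      cases ps with
      | nil => rfl
      | cons p ps => exact absurd (hcov p (by simp)) (by simp)
    simp [this]
  | cons c ks ih =>
    intro ps hnd hcov
    rcases List.nodup_cons.1 hnd with ⟨hc, hnd'⟩
    have hrest : ∀ c' ∈ ks, ps.filter (fun p => p.1 == c')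
        = (ps.filter (fun p => !(p.1 == c))).filter (fun p => p.1 == c') := by
      intro c' hc'
      rw [List.filter_filter]
      refine List.filter_congr ?_
      intro p _
      by_cases h : p.1 = c'
      · have hne : c' ≠ c := fun hh => hc (hh ▸ hc')
        simp [h, hne]
      · simp [h]
    have hmap : ks.map (fun c' => ps.filter (fun p => p.1 == c'))
        = ks.map (fun c' => (ps.filter (fun p => !(p.1 == c))).filter (fun p => p.1 == c')) :=
      List.map_congr_left (fun c' hc' => hrest c' hc')
    have hcov' : ∀ p ∈ ps.filter (fun p => !(p.1 == c)), p.1 ∈ ks := by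
      intro p hp
      have hmem := List.mem_of_mem_filter hp
      have hne : p.1 ≠ c := by
        have := List.of_mem_filter hp
        simpa using this
      rcases List.mem_cons.1 (hcov p hmem) with h | h
      · exact absurd h hne
      · exact h
    have hperm' := ih (ps.filter (fun p => !(p.1 == c))) hnd' hcov'
    have he1 : ((c :: ks).map (fun c' => ps.filter (fun p => p.1 == c'))).flatten
        = ps.filter (fun p => p.1 == c)
            ++ (ks.map (fun c' => (ps.filter (fun p => !(p.1 == c))).filter (fun p => p.1 == c'))).flatten := by
      simp only [List.map_cons, List.flatten_cons, hmap]
    rw [he1]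
    exact (List.Perm.append_left _ hperm').trans (List.filter_append_perm _ ps)

lemma pvChars_nodup (l : List (Int × Char)) : (pvChars l).Nodup := by
  have h : (PySem.List.dedup (l.map (·.2))).Perm (pvChars l) :=
    (PySem.List.sorted_perm _ _ _).symm
  exact h.nodup (PySem.List.nodup_dedup _)

lemma pvChars_mem (l : List (Int × Char)) (c : Char) (h : c ∈ l.map (·.2)) : c ∈ pvChars l := by
  rw [pvChars, PySem.List.mem_sorted, PySem.List.mem_dedup]
  exact h

lemma pvGp_perm (l : List (Int × Char)) : (pvGp l).Perm (l.map Prod.swap) := by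
  rw [pvGp]
  have hmap : (pvChars l).map (pvGrp l)
      = (pvChars l).map (fun c => (l.map Prod.swap).filter (fun p => p.1 == c)) :=
    List.map_congr_left (fun c _ => pvGrp_eq_filter l c)
  rw [hmap]
  refine pvFiber_perm (pvChars l) (l.map Prod.swap) (pvChars_nodup l) ?_
  intro p hp
  rcases List.mem_map.1 hp with ⟨q, hq, hqe⟩
  refine pvChars_mem l p.1 ?_
  rw [← hqe]
  exact List.mem_map.2 ⟨q, hq, rfl⟩

lemma pvEnum_pairwise_fst (cs : List Char) :
    (PySem.List.enumerate cs).Pairwise (fun p q => p.1 < q.1) := by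
  have h := PySem.List.map_fst_enumerate cs 0
  have hpw : ((PySem.List.enumerate cs).map (·.1)).Pairwise (· < ·) := by
    rw [h]; exact PySem.List.pairwise_lt_pyRange_one _ _
  exact (List.pairwise_map).1 hpw

lemma pvP_pairwise (l : List (Int × Char)) (hl : l.Pairwise (fun p q => p.1 < q.1)) (c : Char) :
    (pvP l c).Pairwise (· < ·) := by
  rw [pvP]
  exact (List.pairwise_map).2 (hl.filter _)

lemma pvChars_pairwise (l : List (Int × Char)) : (pvChars l).Pairwise (· < ·) := by
  rw [pvChars, PySem.List.dedup_eq_ofList]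
  exact PySem.List.sorted_ofList_pairwise_lt _

lemma pvMem_pvGrp {l : List (Int × Char)} {c : Char} {p : Char × Int} (h : p ∈ pvGrp l c) :
    p.1 = c := by
  rcases List.mem_map.1 h with ⟨i, _, hi⟩
  rw [← hi]

lemma pvGp_pairwise (l : List (Int × Char)) (hl : l.Pairwise (fun p q => p.1 < q.1)) :
    (pvGp l).Pairwise pvLt := by
  rw [pvGp, List.pairwise_flatten]
  constructor
  · intro g hg
    rcases List.mem_map.1 hg with ⟨c, _, hc⟩
    rw [← hc, pvGrp]
    refine (List.pairwise_map).2 ?_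
    exact (pvP_pairwise l hl c).imp (fun h => Or.inr ⟨rfl, h⟩)
  · have hcs := pvChars_pairwise l
    rw [List.pairwise_map]
    refine hcs.imp ?_
    intro c c' hlt x hx y hy
    exact Or.inl ((pvMem_pvGrp hx).symm ▸ (pvMem_pvGrp hy).symm ▸ hlt)

-- zip cs range = swapped enumerate
lemma pvZip_enum : ∀ (cs : List Char) (s : Int),
    List.zip cs (PySem.List.pyRange s (s + cs.length) 1)
      = (PySem.List.enumerate cs s).map Prod.swap := by
  intro cs
  induction cs with
  | nil => intro s; simp [PySem.List.enumerate_nil]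
  | cons c cs ih =>
    intro s
    have hlt : s < s + ((c :: cs).length : Int) := by
      simp only [List.length_cons]; push_cast; omega
    rw [PySem.List.pyRange_one_cons hlt, PySem.List.enumerate_cons]
    have harg : s + ((c :: cs).length : Int) = (s + 1) + (cs.length : Int) := by
      simp only [List.length_cons]; push_cast; ring
    simp only [List.zip_cons_cons, List.map_cons]
    rw [harg, ih (s + 1)]
    rfl

-- the sorted pair list IS the grouped list
lemma pvPairs_eq (W : String) :
    PySem.List.sorted2 (List.zip W.toList (PySem.List.pyRange 0 (PySem.Str.len W) 1))
      (fun p => p.1) (fun p => p.2) false = pvGp (PySem.List.enumerate W.toList) := by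
  have hzip : List.zip W.toList (PySem.List.pyRange 0 (PySem.Str.len W) 1)
      = (PySem.List.enumerate W.toList).map Prod.swap := by
    have := pvZip_enum W.toList 0
    simpa [PySem.Str.len_eq] using this
  rw [hzip]
  exact pvSorted2_eq _ _ (pvGp_perm _) (pvGp_pairwise _ (pvEnum_pairwise_fst _))

-- ---- zip/drop bookkeeping ----
lemma pvZipA {α β : Type} : ∀ (xs ys : List α) (zs : List β),
    (xs ++ ys).zip zs = xs.zip zs ++ ys.zip (zs.drop xs.length) := by
  intro xs
  induction xs with
  | nil => intro ys zs; simp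
  | cons x xs ih =>
    intro ys zs
    cases zs with
    | nil => simp
    | cons z zs => simp [ih]

lemma pvZipB {α β : Type} : ∀ (ys : List β) (xs : List α) (zs : List β),
    xs.zip (ys ++ zs) = xs.zip ys ++ (xs.drop ys.length).zip zs := by
  intro ys
  induction ys with
  | nil => intro xs zs; simp
  | cons y ys ih =>
    intro xs zs
    cases xs with
    | nil => simp
    | cons x xs => simp [ih]

lemma pvCrossFold (mm : Int × Int) : ∀ (ps : List ((Char × Int) × (Char × Int))),
    (∀ q ∈ ps, q.1.1 ≠ q.2.1) → ps.foldl pvStepZ mm = mm := by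
  intro ps
  induction ps generalizing mm with
  | nil => intro _; rfl
  | cons q ps ih =>
    intro h
    have hq : q.1.1 ≠ q.2.1 := h q (by simp)
    have : pvStepZ mm q = mm := by
      simp [pvStepZ, hq]
    rw [List.foldl_cons, this]
    exact ih mm (fun q hqm => h q (by simp [hqm]))

lemma pvMinIf (mn s : Int) : min mn s = if s < mn then s else mn := by
  split_ifs with h <;> omega

lemma pvMaxIf (mx s : Int) : max mx s = if mx < s then s else mx := by
  split_ifs with h <;> omega

lemma pvWithinFold (L : List Int) (c : Char) (k : Nat) (mm : Int × Int) :
    (((L.map (fun i => (c, i))).zip ((L.map (fun i => (c, i))).drop k)).foldl pvStepZ mm)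
      = ((L.zip (L.drop k)).map (fun q => q.2 - q.1 + 1)).foldl pvStep mm := by
  rw [← List.map_drop, List.zip_map, List.foldl_map, List.foldl_map]
  have hstep : (fun (mm : Int × Int) (q : Int × Int) =>
      pvStepZ mm (Prod.map (fun i => ((c : Char), i)) (fun i => (c, i)) q))
      = (fun (mm : Int × Int) (q : Int × Int) => pvStep mm (q.2 - q.1 + 1)) := by
    funext mm q
    simp [pvStepZ, pvStep, Prod.map, pvMinIf, pvMaxIf]
  rw [hstep]

lemma pvMem_flatten_grp {l : List (Int × Char)} {ks : List Char} {p : Char × Int}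
    (h : p ∈ ((ks.map (pvGrp l)).flatten)) : p.1 ∈ ks := by
  rcases List.mem_flatten.1 h with ⟨g, hg, hpg⟩
  rcases List.mem_map.1 hg with ⟨c, hc, hce⟩
  rw [pvMem_pvGrp (hce ▸ hpg)]
  exact hc

lemma pvZLemma (l : List (Int × Char)) (k : Nat) : ∀ (ks : List Char), ks.Nodup → ∀ (mm : Int × Int),
    (((ks.map (pvGrp l)).flatten).zip (((ks.map (pvGrp l)).flatten).drop k)).foldl pvStepZ mm
      = ((ks.map (fun c => ((pvP l c).zip ((pvP l c).drop k)).map (fun q => q.2 - q.1 + 1))).flatten).foldl pvStep mm := by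
  intro ks
  induction ks with
  | nil => intro _ mm; rfl
  | cons c ks ih =>
    intro hnd mm
    rcases List.nodup_cons.1 hnd with ⟨hc, hnd'⟩
    set g := pvGrp l c with hg
    set Y := (ks.map (pvGrp l)).flatten with hY
    have hflat : ((c :: ks).map (pvGrp l)).flatten = g ++ Y := by simp [hg, hY]
    -- every pair with fst from g and snd from Y is guard-false
    have hdiff : ∀ (a b : Char × Int), a ∈ g → b ∈ Y → a.1 ≠ b.1 := by
      intro a b ha hb
      have ha' : a.1 = c := pvMem_pvGrp ha
      have hb' : b.1 ∈ ks := pvMem_flatten_grp hb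
      rw [ha']
      intro hEq
      exact hc (hEq ▸ hb')
    have hRHS : ((c :: ks).map (fun c => ((pvP l c).zip ((pvP l c).drop k)).map (fun q => q.2 - q.1 + 1))).flatten
        = ((pvP l c).zip ((pvP l c).drop k)).map (fun q => q.2 - q.1 + 1)
          ++ ((ks.map (fun c => ((pvP l c).zip ((pvP l c).drop k)).map (fun q => q.2 - q.1 + 1))).flatten) := by
      simp
    rw [hflat, hRHS, List.foldl_append]
    by_cases hk : k ≤ g.length
    · have hdrop : (g ++ Y).drop k = g.drop k ++ Y := List.drop_append_of_le_length hk
      have hdrop2 : (g.drop k ++ Y).drop g.length = Y.drop k := by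
        rw [List.drop_append, List.drop_drop]
        have h2 : g.drop (k + g.length) = [] := List.drop_eq_nil_of_le (by omega)
        rw [h2, List.nil_append]
        congr 1
        have h1 : (g.drop k).length = g.length - k := by simp
        omega
      rw [hdrop, pvZipA, pvZipB, hdrop2, List.foldl_append, List.foldl_append]
      have hwin : (g.zip (g.drop k)).foldl pvStepZ mm
          = (((pvP l c).zip ((pvP l c).drop k)).map (fun q => q.2 - q.1 + 1)).foldl pvStep mm :=
        pvWithinFold (pvP l c) c k mm
      rw [hwin]
      set mm' := (((pvP l c).zip ((pvP l c).drop k)).map (fun q => q.2 - q.1 + 1)).foldl pvStep mm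
      have hcrossnull : ((g.drop (g.drop k).length).zip Y).foldl pvStepZ mm' = mm' := by
        refine pvCrossFold mm' _ ?_
        intro q hq
        have := List.of_mem_zip (a := q.1) (b := q.2) (by simpa using hq)
        exact hdiff q.1 q.2 (List.mem_of_mem_drop this.1) this.2
      rw [hcrossnull]
      exact ih hnd' mm'
    · push_neg at hk
      have hgd : g.drop k = [] := List.drop_eq_nil_of_le (by omega)
      have hwin : ((pvP l c).zip ((pvP l c).drop k)) = [] := by
        have hlen : (pvP l c).length = g.length := by simp [hg, pvGrp]
        have : (pvP l c).drop k = [] := List.drop_eq_nil_of_le (by omega)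
        simp [this]
      have hdrop : (g ++ Y).drop k = Y.drop (k - g.length) := by
        rw [List.drop_append, hgd, List.nil_append]
      have hdrop2 : (Y.drop (k - g.length)).drop g.length = Y.drop k := by
        rw [List.drop_drop]; congr 1; omega
      rw [hdrop, pvZipA, hdrop2, List.foldl_append]
      have hcrossnull : (g.zip (Y.drop (k - g.length))).foldl pvStepZ mm = mm := by
        refine pvCrossFold mm _ ?_
        intro q hq
        have := List.of_mem_zip (a := q.1) (b := q.2) (by simpa using hq)
        exact hdiff q.1 q.2 this.1 (List.mem_of_mem_drop this.2)
      rw [hwin, List.map_nil, List.foldl_nil, hcrossnull]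
      exact ih hnd' mm

lemma pvLen_nonneg (L : List Int) : 0 ≤ PySem.List.len L := by
  simp [PySem.List.len]

lemma pvWindow_eq (K : Int) (hK : 1 ≤ K) (L : List Int) :
    ((L.zip (L.drop (K - 1).toNat)).map (fun q => q.2 - q.1 + 1)) = pvW K L := by
  rw [pvW]
  have hlen0 := pvLen_nonneg L
  apply List.ext_getElem
  · simp only [List.length_map, List.length_zip, List.length_drop,
      PySem.List.length_pyRange_one]
    simp only [PySem.List.len]
    omega
  · intro i h1 h2
    simp only [List.getElem_map, PySem.List.getElem_pyRange_one]
    have hi : i < (L.zip (L.drop (K - 1).toNat)).length := by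
      simpa using h1
    have hiL : i < L.length := by
      simp only [List.length_zip, List.length_drop] at hi
      omega
    have hiK : i + (K - 1).toNat < L.length := by
      simp only [List.length_zip, List.length_drop] at hi
      omega
    rw [List.getElem_zip, List.getElem_drop]
    have e1 : PySem.List.pyGetD L (0 + (i : Int) + K - 1) 0 = L[(K - 1).toNat + i]'(by omega) := by
      rw [PySem.List.pyGetD_eq_getElem]
      · congr 1; omega
      · omega
      · omega
    have e2 : PySem.List.pyGetD L (0 + (i : Int)) 0 = L[i] := by
      rw [PySem.List.pyGetD_eq_getElem]
      · congr 1; omega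
      · omega
      · omega
    rw [e1, e2]

-- B = fold of pvStep over the sorted-grouped spans
lemma pvB_eq_fold (K : Int) (hK : 1 ≤ K) (W : String) :
    find_string_alt K W
      = (((pvChars (PySem.List.enumerate W.toList)).map
            (fun c => pvW K (pvP (PySem.List.enumerate W.toList) c))).flatten).foldl
          pvStep (PySem.Str.len W + 1, -1) := by
  set l := PySem.List.enumerate W.toList with hl
  have halt : find_string_alt K W
      = (List.zip (pvGp l) (PySem.List.slice (pvGp l) (some (K - 1)) none)).foldl
          pvStepZ (PySem.Str.len W + 1, -1) := by
    simp only [find_string_alt]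
    rw [pvPairs_eq W]
    rfl
  rw [halt, PySem.List.slice_from _ (by omega : (0:Int) ≤ K - 1)]
  rw [pvGp]
  rw [pvZLemma l (K - 1).toNat (pvChars l) (pvChars_nodup l)]
  congr 1
  refine congrArg List.flatten (List.map_congr_left ?_)
  intro c _
  exact pvWindow_eq K hK (pvP l c)

lemma pvStep_rcomm : ∀ (mm : Int × Int) (a b : Int),
    pvStep (pvStep mm a) b = pvStep (pvStep mm b) a := by
  intro mm a b
  simp [pvStep, min_right_comm, max_right_comm]

lemma pvFoldl_perm (l1 l2 : List Int) (h : l1.Perm l2) (a : Int × Int) :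
    l1.foldl pvStep a = l2.foldl pvStep a := by
  haveI : RightCommutative pvStep := ⟨pvStep_rcomm⟩
  exact h.foldl_eq a

lemma pvSpans_perm (K : Int) (l : List (Int × Char)) :
    (pvSpans K l).Perm
      (((pvChars l).map (fun c => pvW K (pvP l c))).flatten) := by
  rw [pvSpans]
  refine List.Perm.flatten ?_
  exact (List.Perm.map _ (PySem.List.sorted_perm _ _ _)).symm

-- ===== VERDICT (by name: the statement is the Claim_ definition above) =====
theorem find_string_spec : Claim_equal_find_string := by
  intro K W hDom hPre
  unfold Spec_find_string
  rcases hPre with hK | hW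
  · rw [pvA_eq_fold, pvB_eq_fold K hK W]
    exact pvFoldl_perm _ _ (pvSpans_perm K _) _
  · subst hW
    rfl
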